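-- pv_equiv track=rewrite | github.com/MaxBuster380/Color-Filter | matrixHelper.py | matrix_getColumn
-- ===== SOURCE A (Python) =====
-- def matrix_get(M,line,column):
--     """Gets a value of the given matrix on the given coordinates
--
--         Example :
--             M = | 1 4 |
--                 | 3 2 |
--             matrix_get(M,1,2)  ->  4
--
--         IN
--             M : Matrix, source of the output
--             line : Integer, line of the output value
--             column : Integer, column of the output value
--         OUT
--             Number, value of the matrix M on (line,column)
--     """
--     return M[line-1][column-1]
--
-- def matrix_lineCount(M):
--     """Gets the number of lines on the given matrix
--
--         Example :
--             M = | 1 4 |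
--                 | 3 2 |
--                 | 6 7 |
--
--             matrix_lineCount(M)  ->  3
--
--         IN
--             M : Matrix
--         OUT
--             Integer, number of lines on the matrix
--     """
--     return len(M)
--
-- def matrix_columnCount(M):
--     """Gets the number of columns on the given matrix
--
--         Example :
--             M = | 1 4 |
--                 | 3 2 |
--                 | 6 7 |
--
--             matrix_lineCount(M)  ->  2
--
--         IN
--             M : Matrix
--         OUT
--             Integer, number of columns on the matrix
--     """
--     return len(M[0])
--
-- def matrix_getColumn(M,column):
--     """Gets the column of a given matrix
--
--         Example :
--             M =
--             | 1	3 |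
--             | 0	2 |
--
--             matrix_getColumn(M,1)  ->  [1,0]
--
--         IN
--             M : Matrix, source
--             column: Integer, column to get
--         OUT
--             List of integers, column found
--     """
--
--     lineCount = matrix_lineCount(M)
--     columnCount = matrix_columnCount(M)
--     res = [0 for i in range(lineCount)]
--     for i in range(1,lineCount+1):
--         val = matrix_get(M,i,column)
--         res[i-1] = val
--     return res
-- ===== SOURCE B (Python) =====
-- def matrix_getColumn(M, column):
--     return list(list(zip(*M))[column - 1])
-- ===== Notes on version B (the rewrite author's own statement) =====
-- stated objective: idiomatic
-- what changed: A preallocates a zero list and fills it by index with matrix_get(M,i,column) in a 1-based range loop; B transposes the matrix zip(*M)-style and simply selects row column-1 of the transpose.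
-- outside the precondition, e.g. on matrix_getColumn([[1, 2], [3]], 0): A returns [2, 3], B returns [1, 3]
import Mathlib
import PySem

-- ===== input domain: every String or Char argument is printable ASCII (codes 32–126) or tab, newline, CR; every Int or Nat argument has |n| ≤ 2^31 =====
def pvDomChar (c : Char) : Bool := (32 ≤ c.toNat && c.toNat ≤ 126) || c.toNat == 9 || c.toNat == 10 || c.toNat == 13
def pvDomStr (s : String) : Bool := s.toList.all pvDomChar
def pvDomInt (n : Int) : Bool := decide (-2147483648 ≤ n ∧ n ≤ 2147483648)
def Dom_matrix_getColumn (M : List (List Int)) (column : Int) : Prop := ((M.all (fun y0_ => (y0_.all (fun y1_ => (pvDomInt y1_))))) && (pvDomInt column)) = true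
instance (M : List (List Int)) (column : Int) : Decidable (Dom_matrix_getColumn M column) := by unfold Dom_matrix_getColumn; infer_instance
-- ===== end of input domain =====

-- B replaces A's preallocate-and-assign index loop by transposing M (zip-style) and
-- selecting the (column-1)-th row of the transpose; objective: idiomatic.

-- ===== PORT A =====
-- matrix_get(M, line, column) = M[line-1][column-1]; an IndexError (pyGet? = none) is
-- excluded by Pre_matrix_getColumn, so .getD only fills the impossible branch.
def pvMatrixGet (M : List (List Int)) (line column : Int) : Int :=
  ((PySem.List.pyGet? M (line - 1)).getD []) |> fun row =>
    (PySem.List.pyGet? row (column - 1)).getD 0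

def matrix_getColumn (M : List (List Int)) (column : Int) : List Int :=
  let lineCount : Int := M.length                       -- matrix_lineCount(M)
  let _columnCount : Int := (M.headD []).length         -- matrix_columnCount(M) = len(M[0]); M = [] raises, excluded by Pre_
  let res : List Int := (PySem.List.pyRange 0 lineCount 1).map (fun _ => 0)  -- [0 for i in range(lineCount)]
  -- for i in range(1, lineCount+1): res[i-1] = matrix_get(M, i, column)
  -- the assignment index i-1 is always in 0..lineCount-1, so .toNat is exact here
  (PySem.List.pyRange 1 (lineCount + 1) 1).foldl
    (fun r i => r.set (i - 1).toNat (pvMatrixGet M i column)) res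

-- ===== PORT B =====
-- hand port of Python's zip(*M): rows of the transpose until some row of M is exhausted;
-- fuel = length of the first row bounds the number of produced rows exactly
def pvZipStar : Nat → List (List Int) → List (List Int)
  | 0, _ => []
  | fuel + 1, M =>
    if M.isEmpty || M.any List.isEmpty then []
    else (M.map (fun r => r.headD 0)) :: pvZipStar fuel (M.map List.tail)

def matrix_getColumn_alt (M : List (List Int)) (column : Int) : List Int :=
  -- list(list(zip(*M))[column - 1]); an IndexError (pyGet? = none) is excluded by Pre_
  (PySem.List.pyGet? (pvZipStar (M.headD []).length M) (column - 1)).getD []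

-- ===== PRECONDITION & SPEC =====
-- Pre_ excludes the inputs where A raises IndexError (empty M, column index out of range)
-- and non-rectangular matrices, where A's per-row indexing and B's zip-truncating
-- transpose are two equally defensible readings of an input outside the matrix contract.
def Pre_matrix_getColumn (M : List (List Int)) (column : Int) : Prop :=
  M ≠ [] ∧ (∀ row ∈ M, row.length = (M.headD []).length) ∧
    1 - ((M.headD []).length : Int) ≤ column ∧ column ≤ ((M.headD []).length : Int)
instance (M : List (List Int)) (column : Int) : Decidable (Pre_matrix_getColumn M column) := by
  unfold Pre_matrix_getColumn; infer_instance

def pvWitness_matrix_getColumn : List (List Int) × Int := ([[1, 3], [0, 2]], 1)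

def Spec_matrix_getColumn (M : List (List Int)) (column : Int) (out : List Int) : Prop := out = matrix_getColumn_alt M column
instance (M : List (List Int)) (column : Int) (out : List Int) : Decidable (Spec_matrix_getColumn M column out) := by unfold Spec_matrix_getColumn; infer_instance

-- ===== CLAIM (what is proved, stated in full; the proofs are below) =====
def Claim_equal_matrix_getColumn : Prop := ∀ (M : List (List Int)) (column : Int), Dom_matrix_getColumn M column → Pre_matrix_getColumn M column → Spec_matrix_getColumn M column (matrix_getColumn M column)

-- ===== LEMMAS AND PROOFS =====

-- the resolved (nonnegative) index of Python's xs[column-1] on rows of width w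
def pvIdx (column : Int) (w : Nat) : Nat :=
  (column - 1 + if column ≤ 0 then (w : Int) else 0).toNat

theorem pvIdx_lt (column : Int) (w : Nat)
    (h1 : 1 - (w : Int) ≤ column) (h2 : column ≤ (w : Int)) (_hw : 0 < (w : Int)) :
    pvIdx column w < w := by
  unfold pvIdx; split <;> omega

theorem pyGet?_row {α : Type} (row : List α) (d : α) (column : Int) (w : Nat)
    (hlen : row.length = w)
    (h1 : 1 - (w : Int) ≤ column) (h2 : column ≤ (w : Int)) (hw : 0 < (w : Int)) :
    PySem.List.pyGet? row (column - 1) = some (row.getD (pvIdx column w) d) := by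
  have hj : pvIdx column w < w := pvIdx_lt column w h1 h2 hw
  by_cases hc : column ≤ 0
  · have hk0 : 0 < (1 - column).toNat := by omega
    have hkw : (1 - column).toNat ≤ row.length := by omega
    have heq : column - 1 = -(((1 - column).toNat : Int)) := by omega
    rw [heq, PySem.List.pyGet?_neg_natCast row (1 - column).toNat hk0 hkw]
    have hidx : row.length - (1 - column).toNat = pvIdx column w := by
      unfold pvIdx; simp only [if_pos hc]; omega
    rw [hidx, List.getElem?_eq_getElem (by omega), List.getD_eq_getElem _ _ (by omega)]
  · have h0 : (0 : Int) ≤ column - 1 := by omega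
    rw [PySem.List.pyGet?_of_nonneg row h0]
    have hidx : (column - 1).toNat = pvIdx column w := by
      unfold pvIdx; simp only [if_neg hc]; omega
    rw [hidx, List.getElem?_eq_getElem (by omega), List.getD_eq_getElem _ _ (by omega)]

-- A's loop fills res position by position with M[i-1][column-1]
theorem loopA (M : List (List Int)) (column : Int) :
    ∀ (s : Nat) (res : List Int), res.length = M.length → s ≤ M.length →
    (PySem.List.pyRange ((s : Int) + 1) ((M.length : Int) + 1) 1).foldl
        (fun r i => r.set (i - 1).toNat (pvMatrixGet M i column)) res
      = res.take s ++ (M.drop s).map (fun row => (PySem.List.pyGet? row (column - 1)).getD 0) := by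
  intro s
  induction' hn : M.length - s with d ih generalizing s
  · intro res hres hs
    have hse : s = M.length := by omega
    have hempty : PySem.List.pyRange ((s : Int) + 1) ((M.length : Int) + 1) 1 = [] := by
      rw [PySem.List.pyRange_one]
      have h0 : (((M.length : Int) + 1) - ((s : Int) + 1)).toNat = 0 := by omega
      rw [h0]; simp
    rw [hempty]
    subst hse
    rw [List.foldl_nil, List.drop_length, List.map_nil, List.append_nil,
        List.take_of_length_le (le_of_eq hres)]
  · intro res hres hs
    have hslt : s < M.length := by omega
    rw [PySem.List.pyRange_one_cons (by omega)]
    simp only [List.foldl_cons]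
    have hsub : ((s : Int) + 1 - 1).toNat = s := by omega
    rw [hsub]
    have harg : ((s : Int) + 1 + 1) = (((s + 1 : Nat) : Int) + 1) := by push_cast; ring
    rw [harg, ih (s + 1) (by omega) _ (by simp [hres]) (by omega)]
    have hv : pvMatrixGet M ((s : Int) + 1) column
        = (PySem.List.pyGet? M[s] (column - 1)).getD 0 := by
      unfold pvMatrixGet
      have h1 : ((s : Int) + 1 - 1) = (s : Int) := by ring
      rw [h1, PySem.List.pyGet?_natCast, List.getElem?_eq_getElem hslt]
      simp
    rw [List.take_add_one, List.getElem?_set_self (by omega), List.take_set,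
        List.set_eq_of_length_le (by rw [List.length_take]; omega)]
    rw [List.drop_eq_getElem_cons hslt, List.map_cons, ← hv]
    simp

-- the transpose of a nonempty rectangular matrix, row by row
theorem zipStar_rect : ∀ (w : Nat) (M : List (List Int)), M ≠ [] →
    (∀ row ∈ M, row.length = w) →
    pvZipStar w M = (List.range w).map (fun k => M.map (fun row => row.getD k 0)) := by
  intro w
  induction w with
  | zero => intro M _ _; simp [pvZipStar]
  | succ d ih =>
    intro M hne hrect
    have hno : ¬ (M.isEmpty || M.any List.isEmpty) = true := by
      simp only [Bool.or_eq_true, List.isEmpty_iff, List.any_eq_true, not_or]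
      refine ⟨hne, ?_⟩
      rintro ⟨row, hrow, hemp⟩
      have hl := hrect row hrow
      rw [hemp] at hl
      simp at hl
    rw [pvZipStar, if_neg hno]
    have htl : ∀ row ∈ M.map List.tail, row.length = d := by
      intro row hrow
      obtain ⟨r, hr, rfl⟩ := List.mem_map.mp hrow
      have hl := hrect r hr
      simp only [List.length_tail]
      omega
    have hne' : M.map List.tail ≠ [] := by simpa using hne
    rw [ih (M.map List.tail) hne' htl]
    rw [List.range_succ_eq_map]
    simp only [List.map_cons, List.map_map]
    congr 1
    · apply List.map_congr_left
      intro r hr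
      have hlen := hrect r hr
      cases r with
      | nil => simp at hlen
      | cons a t => simp
    · apply List.map_congr_left
      intro k hk
      simp only [Function.comp]
      apply List.map_congr_left
      intro r hr
      have hlen := hrect r hr
      cases r with
      | nil => simp at hlen
      | cons a t => simp

-- ===== VERDICT (by name: the statement is the Claim_ definition above) =====
theorem matrix_getColumn_spec : Claim_equal_matrix_getColumn := by
  intro M column _hdom hpre
  obtain ⟨hne, hrect, h1, h2⟩ := hpre
  unfold Spec_matrix_getColumn
  set w : Nat := (M.headD []).length with hw
  have hwpos : 0 < (w : Int) := by omega
  have hj : pvIdx column w < w := pvIdx_lt column w h1 h2 hwpos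
  have hA : matrix_getColumn M column
      = M.map (fun row => (PySem.List.pyGet? row (column - 1)).getD 0) := by
    have hres : ((PySem.List.pyRange 0 (M.length : Int) 1).map (fun _ => (0 : Int))).length
        = M.length := by
      rw [List.length_map, PySem.List.length_pyRange_one]; omega
    have h := loopA M column 0 ((PySem.List.pyRange 0 (M.length : Int) 1).map (fun _ => 0))
      hres (by omega)
    simp only [Nat.cast_zero, zero_add, List.take_zero, List.drop_zero, List.nil_append] at h
    unfold matrix_getColumn
    exact h
  have hB : matrix_getColumn_alt M column
      = M.map (fun row => row.getD (pvIdx column w) 0) := by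
    unfold matrix_getColumn_alt
    rw [← hw, zipStar_rect w M hne hrect]
    rw [pyGet?_row ((List.range w).map (fun k => M.map (fun row => row.getD k 0)))
      [] column w (by simp) h1 h2 hwpos]
    simp only [Option.getD_some]
    rw [List.getD_eq_getElem _ _ (by simpa using hj), List.getElem_map, List.getElem_range]
  rw [hA, hB]
  apply List.map_congr_left
  intro row hrow
  rw [pyGet?_row row 0 column w (hrect row hrow) h1 h2 hwpos]
  simp
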